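-- pv_equiv track=rewrite | github.com/qtpeters/development | python/binaryNumbers.py | get_binstr
-- ===== SOURCE A (Python) =====
-- def get_binstr( binmap ):
--
-- 	binstr = ""
-- 	largest = binmap[0]
-- 	for i in range( 1, largest + 1 ):
--
-- 		if i in binmap:
-- 			binstr = "1" + binstr
-- 		else:
-- 			binstr = "0" + binstr
--
-- 	return binstr
-- ===== SOURCE B (Python) =====
-- def get_binstr(binmap):
--     largest = binmap[0]
--     bits = ["0"] * largest
--     for v in binmap:
--         if 1 <= v <= largest:
--             bits[v - 1] = "1"
--     return "".join(reversed(bits))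
-- ===== Notes on version B (the rewrite author's own statement) =====
-- stated objective: faster
-- what changed: Replaces the per-position membership scan over binmap (one 'i in binmap' scan per bit) by a single pass over binmap positionally setting a preallocated bit array, joined in reverse.
import Mathlib
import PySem

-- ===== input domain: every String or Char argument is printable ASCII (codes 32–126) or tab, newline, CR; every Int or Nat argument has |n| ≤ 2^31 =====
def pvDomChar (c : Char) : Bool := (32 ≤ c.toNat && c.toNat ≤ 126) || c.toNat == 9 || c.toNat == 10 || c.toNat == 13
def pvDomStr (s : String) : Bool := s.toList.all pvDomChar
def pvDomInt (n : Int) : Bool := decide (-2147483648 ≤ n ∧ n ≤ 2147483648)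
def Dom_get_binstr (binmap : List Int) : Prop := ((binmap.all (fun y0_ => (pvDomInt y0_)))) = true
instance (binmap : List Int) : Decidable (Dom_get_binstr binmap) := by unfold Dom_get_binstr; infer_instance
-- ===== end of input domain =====

-- B replaces A's per-position membership scan by one positional pass over binmap into a
-- preallocated bit array joined in reverse (objective: faster, O(largest+n) vs O(largest*n)).

-- ===== PORT A =====
-- binstr is built as a list of chars, each iteration prepending one character (exact port of
-- '"1" + binstr'); the final string is String.ofList of that list.
def get_binstr (binmap : List Int) : String :=
  let largest := PySem.List.pyGetD binmap 0 0
  String.ofList ((PySem.List.pyRange 1 (largest + 1) 1).foldl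
    (fun binstr i => (if binmap.contains i then '1' else '0') :: binstr) [])

-- ===== PORT B =====
def get_binstr_alt (binmap : List Int) : String :=
  let largest := PySem.List.pyGetD binmap 0 0
  let bits := List.replicate largest.toNat '0'
  let bits := binmap.foldl
    (fun b v => if 1 ≤ v ∧ v ≤ largest then b.set (v - 1).toNat '1' else b) bits
  String.ofList bits.reverse

-- ===== PRECONDITION & SPEC =====
-- Python A raises IndexError on the empty list (binmap[0]); Pre_ excludes exactly that.
def Pre_get_binstr (binmap : List Int) : Prop := binmap ≠ []
instance (binmap : List Int) : Decidable (Pre_get_binstr binmap) := by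
  unfold Pre_get_binstr; infer_instance

def pvWitness_get_binstr : List Int := [3, 1]

def Spec_get_binstr (binmap : List Int) (out : String) : Prop := out = get_binstr_alt binmap
instance (binmap : List Int) (out : String) : Decidable (Spec_get_binstr binmap out) := by
  unfold Spec_get_binstr; infer_instance

-- ===== CLAIM (what is proved, stated in full; the proofs are below) =====
def Claim_equal_get_binstr : Prop := ∀ (binmap : List Int), Dom_get_binstr binmap → Pre_get_binstr binmap → Spec_get_binstr binmap (get_binstr binmap)

-- ===== LEMMAS AND PROOFS =====

-- A's fold prepends one character per range element: it is the reversed map.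
theorem foldA_eq_reverse_map (f : Int → Char) (L : List Int) (acc : List Char) :
    L.foldl (fun s i => f i :: s) acc = (L.map f).reverse ++ acc := by
  induction L generalizing acc with
  | nil => simp
  | cons x xs ih => simp [List.foldl_cons, ih]

theorem setloop_length (largest : Int) (m : List Int) (bits : List Char) :
    (m.foldl (fun b v => if 1 ≤ v ∧ v ≤ largest then b.set (v - 1).toNat '1' else b)
      bits).length = bits.length := by
  induction m generalizing bits with
  | nil => rfl
  | cons v vs ih =>
      simp only [List.foldl_cons]
      rw [ih]
      split <;> simp

-- Characterisation of B's positional pass: entry j is '1' iff j+1 occurs in m (and fits).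
theorem setloop_getElem? (largest : Int) (m : List Int) (bits : List Char) (j : Nat)
    (hj : j < bits.length) (hle : (j : Int) + 1 ≤ largest) :
    (m.foldl (fun b v => if 1 ≤ v ∧ v ≤ largest then b.set (v - 1).toNat '1' else b)
        bits)[j]? =
      if ((j : Int) + 1) ∈ m then some '1' else bits[j]? := by
  induction m generalizing bits with
  | nil => simp
  | cons v vs ih =>
      simp only [List.foldl_cons]
      by_cases hv : 1 ≤ v ∧ v ≤ largest
      · rw [if_pos hv]
        rw [ih _ (by simpa using hj)]
        by_cases heq : v = (j : Int) + 1
        · have hidx : (v - 1).toNat = j := by omega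
          simp [heq, hj]
        · have heq' : ¬((j : Int) + 1 = v) := by omega
          have hset : (List.set bits (v - 1).toNat '1')[j]? = bits[j]? := by
            rw [List.getElem?_set]
            have hne' : v.toNat - 1 ≠ j := by omega
            simp [hne']
          rw [hset]
          simp [List.mem_cons, heq']
      · rw [if_neg hv]
        rw [ih _ hj]
        have heq' : ¬((j : Int) + 1 = v) := by omega
        simp [List.mem_cons, heq']

theorem bits_final_eq (largest : Int) (binmap : List Int) :
    binmap.foldl
        (fun b v => if 1 ≤ v ∧ v ≤ largest then b.set (v - 1).toNat '1' else b)
        (List.replicate largest.toNat '0') =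
      (PySem.List.pyRange 1 (largest + 1) 1).map
        (fun i => if binmap.contains i then '1' else '0') := by
  apply List.ext_getElem?
  intro j
  by_cases hjl : j < largest.toNat
  · rw [setloop_getElem? largest binmap _ j (by simpa using hjl) (by omega)]
    have hjr : j < (PySem.List.pyRange 1 (largest + 1) 1).length := by
      rw [PySem.List.length_pyRange_one]; omega
    rw [List.getElem?_map, List.getElem?_eq_getElem hjr]
    rw [PySem.List.getElem_pyRange_one]
    have harith : (1 : Int) + j = (j : Int) + 1 := by ring
    rw [harith]
    rw [List.getElem?_eq_getElem (by simpa using hjl)]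
    simp [List.getElem_replicate, apply_ite]
  · rw [List.getElem?_eq_none, List.getElem?_eq_none]
    · rw [List.length_map, PySem.List.length_pyRange_one]; omega
    · rw [setloop_length]; simpa using hjl

-- ===== VERDICT (by name: the statement is the Claim_ definition above) =====
theorem get_binstr_spec : Claim_equal_get_binstr := by
  intro binmap _ _
  unfold Spec_get_binstr get_binstr get_binstr_alt
  simp only []
  rw [foldA_eq_reverse_map, bits_final_eq]
  simp
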